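-- pv_equiv track=rewrite | github.com/NikoSoder/DSA-2024 | week_4/bigwin.py | count
-- ===== SOURCE A (Python) =====
-- def count(t):
--     orders = {}
--     count = 0
--
--     for num in t:
--         if num % 2 == 0 and (num // 2) in orders:
--             count += orders[num // 2]
--
--         if num in orders:
--             orders[num] += 1
--         else:
--             orders[num] = 1
--
--     return count
-- ===== SOURCE B (Python) =====
-- def count(t):
--     total = 0
--     prefix = []
--     for num in t:
--         for prev in prefix:
--             if prev * 2 == num:
--                 total += 1
--         prefix.append(num)
--     return total
-- ===== Notes on version B (the rewrite author's own statement) =====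
-- stated objective: simpler
-- what changed: Replaces the dict of running value-counts and the parity/floordiv lookup with a plain nested scan: for each element, count earlier elements whose double equals it.
import Mathlib
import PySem

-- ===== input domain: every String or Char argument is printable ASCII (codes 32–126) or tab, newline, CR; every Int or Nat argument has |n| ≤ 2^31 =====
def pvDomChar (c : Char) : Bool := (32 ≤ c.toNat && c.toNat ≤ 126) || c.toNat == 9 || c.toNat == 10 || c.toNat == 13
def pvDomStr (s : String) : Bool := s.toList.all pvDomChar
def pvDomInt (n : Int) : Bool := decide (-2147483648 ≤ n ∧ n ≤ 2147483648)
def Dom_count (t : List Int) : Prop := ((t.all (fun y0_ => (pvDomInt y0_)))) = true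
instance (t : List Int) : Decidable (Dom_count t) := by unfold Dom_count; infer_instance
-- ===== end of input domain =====

-- B replaces A's running dict of value-counts (with the parity test and floordiv lookup)
-- by a plain nested scan: for each element, count the earlier elements whose double equals it.


-- ===== PORT A =====
-- one loop step of A: maybe add orders[num//2] to count, then bump orders[num]
def countStepA (st : PySem.Dict Int Int × Int) (num : Int) : PySem.Dict Int Int × Int :=
  ((if st.1.contains num then st.1.insert num (st.1.getD num 0 + 1) else st.1.insert num 1),
   (if PySem.Int.mod num 2 = 0 ∧ st.1.contains (PySem.Int.floordiv num 2)
    then st.2 + st.1.getD (PySem.Int.floordiv num 2) 0   -- lookup guarded by 'in', so getD is exact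
    else st.2))

def count (t : List Int) : Int :=
  (t.foldl countStepA (PySem.Dict.empty, 0)).2

-- ===== PORT B =====
-- one loop step of B: scan the prefix of earlier elements, then append num to it
def countStepB (st : List Int × Int) (num : Int) : List Int × Int :=
  (st.1 ++ [num],
   st.1.foldl (fun tot prev => if prev * 2 = num then tot + 1 else tot) st.2)

def count_alt (t : List Int) : Int :=
  (t.foldl countStepB ([], 0)).2

-- ===== PRECONDITION & SPEC =====
def Spec_count (t : List Int) (out : Int) : Prop := out = count_alt t
instance (t : List Int) (out : Int) : Decidable (Spec_count t out) := by unfold Spec_count; infer_instance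

-- ===== CLAIM (what is proved, stated in full; the proofs are below) =====
def Claim_equal_count : Prop := ∀ (t : List Int), Dom_count t → Spec_count t (count t)

-- ===== LEMMAS AND PROOFS =====

-- B's inner scan adds the number of earlier elements whose double is num
lemma innerB (num : Int) : ∀ (l : List Int) (c : Int),
    l.foldl (fun tot prev => if prev * 2 = num then tot + 1 else tot) c
      = c + (l.countP (fun prev => prev * 2 == num) : Int) := by
  intro l
  induction l with
  | nil => intro c; simp
  | cons x xs ih =>
    intro c
    simp only [List.foldl_cons, List.countP_cons, ih]
    by_cases h : x * 2 = num
    · simp [h]; ring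
    · simp [h]

-- the per-element increments of A and B agree when the dict counts the prefix
lemma incr_eq (num : Int) (d : PySem.Dict Int Int) (pre : List Int)
    (h : ∀ k, d.getD k 0 = (pre.count k : Int))
    (hm : ∀ k, d.contains k = true ↔ k ∈ pre) :
    (if PySem.Int.mod num 2 = 0 ∧ d.contains (PySem.Int.floordiv num 2)
     then d.getD (PySem.Int.floordiv num 2) 0 else 0)
      = (pre.countP (fun prev => prev * 2 == num) : Int) := by
  by_cases he : PySem.Int.mod num 2 = 0
  · have hfd : PySem.Int.floordiv num 2 * 2 + PySem.Int.mod num 2 = num :=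
      PySem.Int.floordiv_mul_add_mod num 2
    have hiff : ∀ prev : Int, ((prev * 2 == num) = true ↔ (prev == PySem.Int.floordiv num 2) = true) := by
      intro prev
      simp only [beq_iff_eq]
      constructor <;> intro hp <;> omega
    have hcp : pre.countP (fun prev => prev * 2 == num) = pre.count (PySem.Int.floordiv num 2) := by
      rw [List.count]
      exact List.countP_congr (fun a _ => hiff a)
    by_cases hc : d.contains (PySem.Int.floordiv num 2) = true
    · rw [if_pos ⟨he, hc⟩, h, hcp]
    · have hmem : PySem.Int.floordiv num 2 ∉ pre := fun hmem => hc ((hm _).mpr hmem)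
      rw [if_neg (fun hco => hc hco.2), hcp, List.count_eq_zero.mpr hmem]
      rfl
  · have h0 : pre.countP (fun prev => prev * 2 == num) = 0 := by
      rw [List.countP_eq_zero]
      intro a _ ha
      have ha' : a * 2 = num := by simpa using ha
      have hme : PySem.Int.mod num 2 = num % 2 := PySem.Int.mod_eq_emod_of_pos (by norm_num)
      omega
    rw [if_neg (fun hco => he hco.1), h0]
    rfl

-- main loop invariant: with the dict counting the prefix, both folds' counters agree
lemma loop_eq : ∀ (t : List Int) (d : PySem.Dict Int Int) (pre : List Int) (c : Int),
    (∀ k, d.getD k 0 = (pre.count k : Int)) →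
    (∀ k, d.contains k = true ↔ k ∈ pre) →
    (t.foldl countStepA (d, c)).2 = (t.foldl countStepB (pre, c)).2 := by
  intro t
  induction t with
  | nil => intro d pre c _ _; rfl
  | cons num rest ih =>
    intro d pre c h hm
    simp only [List.foldl_cons]
    have hinc := incr_eq num d pre h hm
    have hcnt : (countStepA (d, c) num).2 = (countStepB (pre, c) num).2 := by
      show (if PySem.Int.mod num 2 = 0 ∧ d.contains (PySem.Int.floordiv num 2)
            then c + d.getD (PySem.Int.floordiv num 2) 0 else c)
          = pre.foldl (fun tot prev => if prev * 2 = num then tot + 1 else tot) c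
      rw [innerB]
      by_cases hg : PySem.Int.mod num 2 = 0 ∧ d.contains (PySem.Int.floordiv num 2)
      · rw [if_pos hg]; rw [if_pos hg] at hinc; omega
      · rw [if_neg hg]; rw [if_neg hg] at hinc; omega
    have hgd : (countStepA (d, c) num).1
        = if d.contains num then d.insert num (d.getD num 0 + 1) else d.insert num 1 := rfl
    have hd' : ∀ k, (countStepA (d, c) num).1.getD k 0 = (((pre ++ [num]).count k : Nat) : Int) := by
      intro k
      rw [hgd]
      by_cases hk : k = num
      · subst hk
        by_cases hc : d.contains k = true
        · rw [if_pos hc, PySem.Dict.getD_insert, if_pos rfl, h k]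
          simp [List.count_append]
        · have h0 : k ∉ pre := fun hmem => hc ((hm k).mpr hmem)
          rw [if_neg hc, PySem.Dict.getD_insert, if_pos rfl]
          simp [List.count_append, List.count_eq_zero.mpr h0]
      · by_cases hc : d.contains num = true
        · rw [if_pos hc, PySem.Dict.getD_insert, if_neg hk, h k]
          simp [List.count_append, Ne.symm hk]
        · rw [if_neg hc, PySem.Dict.getD_insert, if_neg hk, h k]
          simp [List.count_append, Ne.symm hk]
    have hm' : ∀ k, (countStepA (d, c) num).1.contains k = true ↔ k ∈ pre ++ [num] := by
      intro k
      rw [hgd]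
      by_cases hc : d.contains num = true
      · rw [if_pos hc]; simp [PySem.Dict.contains_insert, hm k, or_comm]
      · rw [if_neg hc]; simp [PySem.Dict.contains_insert, hm k, or_comm]
    calc (rest.foldl countStepA (countStepA (d, c) num)).2
        = (rest.foldl countStepB ((pre ++ [num], (countStepA (d, c) num).2))).2 := by
          have hpair : countStepA (d, c) num
              = ((countStepA (d, c) num).1, (countStepA (d, c) num).2) := rfl
          rw [hpair]
          exact ih _ _ _ hd' hm'
      _ = (rest.foldl countStepB (countStepB (pre, c) num)).2 := by rw [hcnt]; rfl

-- ===== VERDICT (by name: the statement is the Claim_ definition above) =====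
theorem count_spec : Claim_equal_count := by
  intro t _
  show count t = count_alt t
  exact loop_eq t PySem.Dict.empty [] 0 (by simp) (by simp)
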